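-- pv_equiv track=rewrite | github.com/CellProfiler/CellProfiler | src/frontend/cellprofiler/modules/imagemath.py | upgrade_settings
-- ===== SOURCE A (Python) =====
-- O_LOG_TRANSFORM_LEGACY = "Log transform (legacy)"
--
-- O_LOG_TRANSFORM = "Log transform (base 2)"
--
-- IM_IMAGE = "Image"
--
-- IMAGE_SETTING_COUNT_1 = 2
--
-- FIXED_SETTING_COUNT_1 = 8
--
-- def upgrade_settings(setting_values, variable_revision_number, module_name):
--     if variable_revision_number == 1:
--         # added image_or_measurement and measurement
--         new_setting_values = setting_values[:FIXED_SETTING_COUNT_1]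
--         for i in range(
--             FIXED_SETTING_COUNT_1, len(setting_values), IMAGE_SETTING_COUNT_1
--         ):
--             new_setting_values += [
--                 IM_IMAGE,
--                 setting_values[i],
--                 setting_values[i + 1],
--                 "",
--             ]
--         setting_values = new_setting_values
--         variable_revision_number = 2
--     if variable_revision_number == 2:
--         # added the ability to ignore the mask
--         new_setting_values = setting_values
--         new_setting_values.insert(6, "No")
--         setting_values = new_setting_values
--         variable_revision_number = 3
--     if variable_revision_number == 3:
--         # Log transform -> legacy log transform
--         if setting_values[0] == O_LOG_TRANSFORM:
--             setting_values = [O_LOG_TRANSFORM_LEGACY] + setting_values[1:]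
--         variable_revision_number = 4
--     if variable_revision_number == 4:
--         # Add NaN handling
--         new_setting_values = setting_values
--         new_setting_values.insert(6, "Yes")
--         setting_values = new_setting_values
--         variable_revision_number = 5
--     return setting_values, variable_revision_number
-- ===== SOURCE B (Python) =====
-- O_LOG_TRANSFORM_LEGACY = "Log transform (legacy)"
-- O_LOG_TRANSFORM = "Log transform (base 2)"
-- IM_IMAGE = "Image"
-- IMAGE_SETTING_COUNT_1 = 2
-- FIXED_SETTING_COUNT_1 = 8
--
--
-- def _reshape(sv):
--     # v1 -> v2: regroup each trailing (operand, factor) pair as an IM_IMAGE 4-tuple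
--     out = sv[:FIXED_SETTING_COUNT_1]
--     rest = sv[FIXED_SETTING_COUNT_1:]
--     while len(rest) >= 2:
--         out += [IM_IMAGE, rest[0], rest[1], ""]
--         rest = rest[2:]
--     return out
--
--
-- def _insert_no(sv):
--     # v2 -> v3: ability to ignore the mask
--     sv.insert(6, "No")
--     return sv
--
--
-- def _legacy_log(sv):
--     # v3 -> v4: Log transform -> legacy log transform
--     if sv[0] == O_LOG_TRANSFORM:
--         return [O_LOG_TRANSFORM_LEGACY] + sv[1:]
--     return sv
--
--
-- def _insert_yes(sv):
--     # v4 -> v5: NaN handling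
--     sv.insert(6, "Yes")
--     return sv
--
--
-- _STEPS = {1: _reshape, 2: _insert_no, 3: _legacy_log, 4: _insert_yes}
--
--
-- def upgrade_settings(setting_values, variable_revision_number, module_name):
--     while variable_revision_number in _STEPS:
--         setting_values = _STEPS[variable_revision_number](setting_values)
--         variable_revision_number += 1
--     return setting_values, variable_revision_number
-- ===== Notes on version B (the rewrite author's own statement) =====
-- stated objective: alternative
-- what changed: Replaces A's four fall-through if-blocks (each comparing and reassigning variable_revision_number) with a table of four small per-revision step functions driven by a while loop, and the index-based range(8,len,2) regrouping loop becomes a two-at-a-time structural pass over the tail slice.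
import Mathlib
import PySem

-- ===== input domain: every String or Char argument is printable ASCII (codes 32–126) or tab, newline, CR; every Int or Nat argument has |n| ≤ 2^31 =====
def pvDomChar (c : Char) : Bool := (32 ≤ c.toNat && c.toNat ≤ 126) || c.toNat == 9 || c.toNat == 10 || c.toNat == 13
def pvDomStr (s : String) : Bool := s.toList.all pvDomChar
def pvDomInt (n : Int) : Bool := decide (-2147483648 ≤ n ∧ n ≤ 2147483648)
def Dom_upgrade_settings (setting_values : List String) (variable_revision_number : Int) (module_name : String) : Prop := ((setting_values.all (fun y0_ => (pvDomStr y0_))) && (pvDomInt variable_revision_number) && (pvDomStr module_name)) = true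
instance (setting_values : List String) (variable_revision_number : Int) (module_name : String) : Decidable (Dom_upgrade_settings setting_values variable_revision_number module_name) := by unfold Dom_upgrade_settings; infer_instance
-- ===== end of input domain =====

-- B replaces A's fall-through if-chain by a table of per-revision step functions run in a
-- while loop (objective: alternative decomposition, same cost).  Equivalence is about the
-- RETURN value only: the Python A (and B's insert steps) mutate the caller's list in place.

-- ===== PORT A =====
def upgrade_settings (setting_values : List String) (variable_revision_number : Int) (module_name : String) : List String × Int :=
  let p1 : List String × Int :=
    if variable_revision_number == 1 then
      -- new_setting_values = setting_values[:8]; for i in range(8, len, 2): += [IM_IMAGE, sv[i], sv[i+1], ""]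
      -- sv[i] / sv[i+1] raise IndexError on an odd tail: excluded by Pre_; pyGetD's default is never read inside Pre_.
      let nsv := (PySem.List.pyRange 8 (setting_values.length : Int) 2).foldl
        (fun acc i => acc ++ ["Image", PySem.List.pyGetD setting_values i "",
                              PySem.List.pyGetD setting_values (i + 1) "", ""])
        (PySem.List.slice setting_values none (some 8))
      (nsv, 2)
    else (setting_values, variable_revision_number)
  let p2 : List String × Int :=
    if p1.2 == 2 then (PySem.List.insert p1.1 6 "No", 3) else p1
  let p3 : List String × Int :=
    if p2.2 == 3 then
      -- setting_values[0] raises on an empty list: excluded by Pre_; "" never equals O_LOG_TRANSFORM.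
      (if PySem.List.pyGetD p2.1 0 "" == "Log transform (base 2)" then
          "Log transform (legacy)" :: PySem.List.slice p2.1 (some 1) none
        else p2.1, 4)
    else p2
  if p3.2 == 4 then (PySem.List.insert p3.1 6 "Yes", 5) else p3

-- ===== PORT B =====
-- while len(rest) >= 2: out += ["Image", rest[0], rest[1], ""]; rest = rest[2:]
def pvChunk (out : List String) (rest : List String) : List String :=
  match rest with
  | a :: b :: t => pvChunk (out ++ ["Image", a, b, ""]) t
  | _ => out

def pvStep (n : Int) (sv : List String) : List String :=
  if n == 1 then
    pvChunk (PySem.List.slice sv none (some 8)) (PySem.List.slice sv (some 8) none)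
  else if n == 2 then PySem.List.insert sv 6 "No"
  else if n == 3 then
    -- sv[0] raises on an empty list: excluded by Pre_; "" never equals O_LOG_TRANSFORM.
    (if PySem.List.pyGetD sv 0 "" == "Log transform (base 2)" then
        "Log transform (legacy)" :: PySem.List.slice sv (some 1) none
      else sv)
  else PySem.List.insert sv 6 "Yes"

-- 'while variable_revision_number in _STEPS': runs at most 4 times (keys 1..4, number increments),
-- so fuel 4 makes the same loop total.
def pvLoop : Nat → List String → Int → List String × Int
  | 0, sv, vrn => (sv, vrn)
  | Nat.succ f, sv, vrn =>
      if vrn == 1 || vrn == 2 || vrn == 3 || vrn == 4 then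
        pvLoop f (pvStep vrn sv) (vrn + 1)
      else (sv, vrn)

def upgrade_settings_alt (setting_values : List String) (variable_revision_number : Int) (module_name : String) : List String × Int :=
  pvLoop 4 setting_values variable_revision_number

-- ===== PRECONDITION & SPEC =====
-- Pre_ excludes exactly the inputs on which the Python A raises IndexError (it returns everywhere else):
-- revision 1 with an odd-length list longer than 8 (setting_values[i+1] past the end), and
-- revision 3 with an empty list (setting_values[0]).
def Pre_upgrade_settings (setting_values : List String) (variable_revision_number : Int) (module_name : String) : Prop :=
  ¬(variable_revision_number = 1 ∧ 8 < setting_values.length ∧ setting_values.length % 2 = 1) ∧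
  ¬(variable_revision_number = 3 ∧ setting_values = [])
instance (setting_values : List String) (variable_revision_number : Int) (module_name : String) : Decidable (Pre_upgrade_settings setting_values variable_revision_number module_name) := by unfold Pre_upgrade_settings; infer_instance

def pvWitness_upgrade_settings : List String × Int × String :=
  (["Log transform (base 2)", "a", "b", "c", "d", "e", "f", "g", "h", "i"], 1, "imagemath")

def Spec_upgrade_settings (setting_values : List String) (variable_revision_number : Int) (module_name : String) (out : List String × Int) : Prop := out = upgrade_settings_alt setting_values variable_revision_number module_name
instance (setting_values : List String) (variable_revision_number : Int) (module_name : String) (out : List String × Int) : Decidable (Spec_upgrade_settings setting_values variable_revision_number module_name out) := by unfold Spec_upgrade_settings; infer_instance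

-- ===== CLAIM (what is proved, stated in full; the proofs are below) =====
def Claim_equal_upgrade_settings : Prop := ∀ (setting_values : List String) (variable_revision_number : Int) (module_name : String), Dom_upgrade_settings setting_values variable_revision_number module_name → Pre_upgrade_settings setting_values variable_revision_number module_name → Spec_upgrade_settings setting_values variable_revision_number module_name (upgrade_settings setting_values variable_revision_number module_name)

-- ===== LEMMAS AND PROOFS =====

lemma pyRange_two_cons (a b : Int) (h : a < b) :
    PySem.List.pyRange a b 2 = a :: PySem.List.pyRange (a + 2) b 2 := by
  rw [PySem.List.pyRange_of_pos _ _ (by norm_num : (0:Int) < 2),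
      PySem.List.pyRange_of_pos _ _ (by norm_num : (0:Int) < 2), if_pos h]
  have hr : (if a + 2 < b then ((b - (a + 2) + 2 - 1) / 2).toNat else 0)
      = ((b - (a + 2) + 2 - 1) / 2).toNat := by split_ifs with h2 <;> omega
  have hn : ((b - a + 2 - 1) / 2).toNat = ((b - (a + 2) + 2 - 1) / 2).toNat + 1 := by omega
  rw [hr, hn, List.range_succ_eq_map, List.map_cons, List.map_map]
  refine List.cons_eq_cons.mpr ⟨by norm_num, List.map_congr_left fun k _ => ?_⟩
  simp only [Function.comp]
  push_cast
  ring

-- A's index loop over range(8, len, 2) equals B's two-at-a-time pass over the dropped tail.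
lemma loop_eq (sv : List String) :
    ∀ (m k : Nat) (acc : List String), sv.length - k = 2 * m →
    (PySem.List.pyRange (k : Int) (sv.length : Int) 2).foldl
      (fun acc i => acc ++ ["Image", PySem.List.pyGetD sv i "",
                            PySem.List.pyGetD sv (i + 1) "", ""]) acc
    = pvChunk acc (sv.drop k) := by
  intro m
  induction m with
  | zero =>
    intro k acc hm
    have hle : sv.length ≤ k := by omega
    have h1 : PySem.List.pyRange (k : Int) (sv.length : Int) 2 = [] := by
      rw [PySem.List.pyRange_of_pos _ _ (by norm_num : (0:Int) < 2)]
      simp [show ¬((k : Int) < (sv.length : Int)) by exact_mod_cast not_lt.mpr hle]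
    rw [h1, List.drop_eq_nil_of_le hle]
    rfl
  | succ m ih =>
    intro k acc hm
    have hk : k < sv.length := by omega
    have hk1 : k + 1 < sv.length := by omega
    rw [pyRange_two_cons _ _ (by exact_mod_cast hk)]
    have g1 : PySem.List.pyGetD sv (k : Int) "" = sv[k] := by
      rw [PySem.List.pyGetD_natCast, List.getD_eq_getElem _ _ hk]
    have g2 : PySem.List.pyGetD sv ((k : Int) + 1) "" = sv[k + 1] := by
      have : ((k : Int) + 1) = ((k + 1 : Nat) : Int) := by push_cast; ring
      rw [this, PySem.List.pyGetD_natCast, List.getD_eq_getElem _ _ hk1]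
    have hdrop : sv.drop k = sv[k] :: sv[k + 1] :: sv.drop (k + 2) := by
      rw [List.drop_eq_getElem_cons hk, List.drop_eq_getElem_cons hk1]
    have hcast : ((k : Int) + 2) = ((k + 2 : Nat) : Int) := by push_cast; ring
    rw [List.foldl_cons, g1, g2, hdrop, hcast, ih (k + 2) _ (by omega)]
    rfl

lemma slice_drop (sv : List String) : PySem.List.slice sv (some 8) none = sv.drop 8 := by
  simp [pysem]

-- ===== VERDICT (by name: the statement is the Claim_ definition above) =====
theorem upgrade_settings_spec : Claim_equal_upgrade_settings := by
  intro sv vrn mn _ hpre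
  unfold Spec_upgrade_settings upgrade_settings upgrade_settings_alt
  by_cases h1 : vrn = 1
  · subst h1
    have key : ∀ acc : List String,
        (PySem.List.pyRange 8 (sv.length : Int) 2).foldl
          (fun acc i => acc ++ ["Image", PySem.List.pyGetD sv i "",
                                PySem.List.pyGetD sv (i + 1) "", ""]) acc
        = pvChunk acc (PySem.List.slice sv (some 8) none) := by
      intro acc
      have heven : sv.length - 8 = 2 * ((sv.length - 8) / 2) := by
        rcases hpre with ⟨hp, -⟩; omega
      have h := loop_eq sv ((sv.length - 8) / 2) 8 acc heven
      rw [slice_drop]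
      simp only [Nat.cast_ofNat] at h
      exact h
    simp [pvLoop, pvStep, key]
  · by_cases h2 : vrn = 2
    · subst h2; simp [pvLoop, pvStep]
    · by_cases h3 : vrn = 3
      · subst h3; simp [pvLoop, pvStep]
      · by_cases h4 : vrn = 4
        · subst h4; simp [pvLoop, pvStep]
        · simp [pvLoop, h1, h2, h3, h4]
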